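-- pv_equiv track=rewrite | github.com/celeschai/aic_combined | aic/aic_utils/aic_isaac/aic_isaaclab/utils/compare_urdf_usd_equivalence.py | _find_usd_link_for_urdf
-- ===== SOURCE A (Python) =====
-- USD_TO_URDF_LINK = {
--     "base": "base_link_inertia",
--     "base_link_inertia": "base_link_inertia",
--     "shoulder": "shoulder_link",
--     "shoulder_link": "shoulder_link",
--     "upper_arm": "upper_arm_link",
--     "upper_arm_link": "upper_arm_link",
--     "forearm": "forearm_link",
--     "forearm_link": "forearm_link",
--     "wrist_1": "wrist_1_link",
--     "wrist_1_link": "wrist_1_link",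
--     "wrist_2": "wrist_2_link",
--     "wrist_2_link": "wrist_2_link",
--     "wrist_3": "wrist_3_link",
--     "wrist_3_link": "wrist_3_link",
-- }
--
-- def _normalize_name(name):
--     """Normalize link/joint name for matching: URDF 'ati/base_link' -> 'ati_base_link'."""
--     return name.replace("/", "_").replace("-", "_").lower()
--
-- def _find_usd_link_for_urdf(usd_links, urdf_link):
--     """Find the best matching USD prim for a URDF link."""
--     urdf_norm = _normalize_name(urdf_link)
--     # Exact normalized match
--     for u in usd_links:
--         if _normalize_name(u["name"]) == urdf_norm:
--             return u
--     # Fallback: USD_TO_URDF_LINK mapping (for legacy names like base->base_link_inertia)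
--     for u in usd_links:
--         usd_norm = _normalize_name(u["name"])
--         mapped = USD_TO_URDF_LINK.get(usd_norm)
--         if mapped and _normalize_name(mapped) == urdf_norm:
--             return u
--     return None
-- ===== SOURCE B (Python) =====
-- USD_TO_URDF_LINK = {
--     "base": "base_link_inertia",
--     "base_link_inertia": "base_link_inertia",
--     "shoulder": "shoulder_link",
--     "shoulder_link": "shoulder_link",
--     "upper_arm": "upper_arm_link",
--     "upper_arm_link": "upper_arm_link",
--     "forearm": "forearm_link",
--     "forearm_link": "forearm_link",
--     "wrist_1": "wrist_1_link",
--     "wrist_1_link": "wrist_1_link",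
--     "wrist_2": "wrist_2_link",
--     "wrist_2_link": "wrist_2_link",
--     "wrist_3": "wrist_3_link",
--     "wrist_3_link": "wrist_3_link",
-- }
--
-- def _normalize_name(name):
--     return name.replace("/", "_").replace("-", "_").lower()
--
-- def _find_usd_link_for_urdf(usd_links, urdf_link):
--     """Single pass: exact normalized match returns immediately; the first
--     mapped (legacy-name) match is remembered and used only if no exact match
--     exists anywhere."""
--     urdf_norm = _normalize_name(urdf_link)
--     first_mapped = None
--     for u in usd_links:
--         usd_norm = _normalize_name(u["name"])
--         if usd_norm == urdf_norm:
--             return u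
--         if first_mapped is None:
--             mapped = USD_TO_URDF_LINK.get(usd_norm)
--             if mapped and _normalize_name(mapped) == urdf_norm:
--                 first_mapped = u
--     return first_mapped
-- ===== Notes on version B (the rewrite author's own statement) =====
-- stated objective: alternative
-- what changed: Replaces A's two sequential scans (exact-match pass, then mapped-name pass) with a single pass that normalizes each name once, returns immediately on an exact match and remembers only the first mapped match in a slot used after the loop.
-- outside the precondition, e.g. on _find_usd_link_for_urdf([{'name': 'x'}, {}], 'x'): A returns {'name': 'x'}, B returns {'name': 'x'}
import Mathlib
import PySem

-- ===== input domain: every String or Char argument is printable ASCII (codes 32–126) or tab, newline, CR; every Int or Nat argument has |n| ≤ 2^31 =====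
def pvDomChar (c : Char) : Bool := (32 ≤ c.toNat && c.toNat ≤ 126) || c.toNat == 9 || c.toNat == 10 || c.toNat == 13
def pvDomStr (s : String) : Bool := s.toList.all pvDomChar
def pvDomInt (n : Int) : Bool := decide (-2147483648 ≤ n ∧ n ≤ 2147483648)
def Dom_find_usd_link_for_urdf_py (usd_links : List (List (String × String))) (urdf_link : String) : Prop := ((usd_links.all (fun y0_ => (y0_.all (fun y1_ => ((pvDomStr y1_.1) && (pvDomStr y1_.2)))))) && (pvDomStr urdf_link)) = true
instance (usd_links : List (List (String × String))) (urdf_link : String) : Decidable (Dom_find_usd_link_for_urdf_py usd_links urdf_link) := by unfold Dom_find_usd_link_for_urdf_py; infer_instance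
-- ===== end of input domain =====

-- B merges A's two sequential scans into a single pass (an exact match returns at once; the first
-- mapped match is remembered in a slot and used only after the loop) — alternative decomposition.


-- ===== PORT A =====
-- _normalize_name: name.replace("/", "_").replace("-", "_").lower()
def pvNormalize (s : String) : String :=
  PySem.Str.lower (PySem.Str.replace (PySem.Str.replace s "/" "_") "-" "_")

-- module constant USD_TO_URDF_LINK
def pvUsdToUrdfLink : PySem.Dict String String := PySem.Dict.mk [
  ("base", "base_link_inertia"), ("base_link_inertia", "base_link_inertia"),
  ("shoulder", "shoulder_link"), ("shoulder_link", "shoulder_link"),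
  ("upper_arm", "upper_arm_link"), ("upper_arm_link", "upper_arm_link"),
  ("forearm", "forearm_link"), ("forearm_link", "forearm_link"),
  ("wrist_1", "wrist_1_link"), ("wrist_1_link", "wrist_1_link"),
  ("wrist_2", "wrist_2_link"), ("wrist_2_link", "wrist_2_link"),
  ("wrist_3", "wrist_3_link"), ("wrist_3_link", "wrist_3_link")]

-- u["name"]; total via getD — Pre_ guarantees the key is present (Python raises KeyError otherwise)
def pvName (u : List (String × String)) : String := (PySem.Dict.mk u).getD "name" ""

-- 'mapped = USD_TO_URDF_LINK.get(usd_norm); mapped and _normalize_name(mapped) == urdf_norm'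
-- (an absent key or an empty string is falsy); shared by both ports, which both contain this test
def pvMappedHit (urdfNorm : String) (u : List (String × String)) : Bool :=
  match pvUsdToUrdfLink.get? (pvNormalize (pvName u)) with
  | some m => !(m == "") && pvNormalize m == urdfNorm
  | none => false

-- A's first loop: exact normalized match
def pvLoopExact (urdfNorm : String) : List (List (String × String)) → Option (List (String × String))
  | [] => none
  | u :: rest => if pvNormalize (pvName u) == urdfNorm then some u else pvLoopExact urdfNorm rest

-- A's second loop: USD_TO_URDF_LINK fallback
def pvLoopMapped (urdfNorm : String) : List (List (String × String)) → Option (List (String × String))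
  | [] => none
  | u :: rest => if pvMappedHit urdfNorm u then some u else pvLoopMapped urdfNorm rest

def find_usd_link_for_urdf_py (usd_links : List (List (String × String))) (urdf_link : String) : Option (List (String × String)) :=
  let urdfNorm := pvNormalize urdf_link
  match pvLoopExact urdfNorm usd_links with
  | some u => some u
  | none => pvLoopMapped urdfNorm usd_links

-- ===== PORT B =====
-- 'if first_mapped is None: … first_mapped = u'
def pvUpdateFM (urdfNorm : String) (firstMapped : Option (List (String × String)))
    (u : List (String × String)) : Option (List (String × String)) :=
  match firstMapped with
  | some v => some v
  | none => if pvMappedHit urdfNorm u then some u else none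

-- B's single pass: return on exact match, else update the first_mapped slot and continue
def pvLoopB (urdfNorm : String) (firstMapped : Option (List (String × String))) :
    List (List (String × String)) → Option (List (String × String))
  | [] => firstMapped
  | u :: rest =>
    if pvNormalize (pvName u) == urdfNorm then some u
    else pvLoopB urdfNorm (pvUpdateFM urdfNorm firstMapped u) rest

def find_usd_link_for_urdf_py_alt (usd_links : List (List (String × String))) (urdf_link : String) : Option (List (String × String)) :=
  pvLoopB (pvNormalize urdf_link) none usd_links

-- ===== PRECONDITION & SPEC =====
-- Pre_ excludes lists in which some element dict lacks the "name" key: there Python A raises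
-- KeyError unless an earlier exact match returns first (an accidental escape B shares anyway).
def Pre_find_usd_link_for_urdf_py (usd_links : List (List (String × String))) (urdf_link : String) : Prop :=
  ∀ u ∈ usd_links, (PySem.Dict.mk u).contains "name" = true

instance (usd_links : List (List (String × String))) (urdf_link : String) : Decidable (Pre_find_usd_link_for_urdf_py usd_links urdf_link) := by unfold Pre_find_usd_link_for_urdf_py; infer_instance

def pvWitness_find_usd_link_for_urdf_py : (List (List (String × String))) × String :=
  ([[("name", "base")], [("name", "wrist_1")]], "wrist_1_link")

def Spec_find_usd_link_for_urdf_py (usd_links : List (List (String × String))) (urdf_link : String) (out : Option (List (String × String))) : Prop := out = find_usd_link_for_urdf_py_alt usd_links urdf_link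
instance (usd_links : List (List (String × String))) (urdf_link : String) (out : Option (List (String × String))) : Decidable (Spec_find_usd_link_for_urdf_py usd_links urdf_link out) := by unfold Spec_find_usd_link_for_urdf_py; infer_instance

-- ===== CLAIM (what is proved, stated in full; the proofs are below) =====
def Claim_equal_find_usd_link_for_urdf_py : Prop := ∀ (usd_links : List (List (String × String))) (urdf_link : String), Dom_find_usd_link_for_urdf_py usd_links urdf_link → Pre_find_usd_link_for_urdf_py usd_links urdf_link → Spec_find_usd_link_for_urdf_py usd_links urdf_link (find_usd_link_for_urdf_py usd_links urdf_link)

-- ===== LEMMAS AND PROOFS =====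
-- loop invariant: B's single pass equals A's exact scan, then the slot, then A's mapped scan
theorem pvLoopB_eq (urdfNorm : String) (ls : List (List (String × String)))
    (fm : Option (List (String × String))) :
    pvLoopB urdfNorm fm ls =
      match pvLoopExact urdfNorm ls with
      | some u => some u
      | none => match fm with
        | some v => some v
        | none => pvLoopMapped urdfNorm ls := by
  induction ls generalizing fm with
  | nil => cases fm <;> rfl
  | cons u rest ih =>
    rw [pvLoopB, pvLoopExact, pvLoopMapped]
    by_cases hx : (pvNormalize (pvName u) == urdfNorm) = true
    · simp only [hx, if_true]
    · simp only [hx, Bool.false_eq_true, if_false]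
      rw [ih]
      cases fm with
      | some v => rfl
      | none =>
        rw [pvUpdateFM]
        by_cases hm : pvMappedHit urdfNorm u = true
        · simp only [hm, if_true]
        · simp only [hm, Bool.false_eq_true, if_false]

-- ===== VERDICT (by name: the statement is the Claim_ definition above) =====
theorem find_usd_link_for_urdf_py_spec : Claim_equal_find_usd_link_for_urdf_py := by
  intro usd_links urdf_link _ _
  unfold Spec_find_usd_link_for_urdf_py find_usd_link_for_urdf_py find_usd_link_for_urdf_py_alt
  rw [pvLoopB_eq]
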